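-- pv_equiv track=rewrite | github.com/viral-medialab/next-week-tonight | old-system/video_segmentation_module.py | reduce_cluster_clip_windows
-- ===== SOURCE A (Python) =====
-- def reduce_cluster_clip_windows(windows):
--     clips = []
--     start = windows[0][0]
--     end = windows[0][1]
--     for i in range(len(windows)):
--         if windows[i][0] - end > 30:
--             clips.append((start, end))
--             start = windows[i][0]
--             end = windows[i][1]
--             if i == len(windows) - 1:
--                 clips.append(windows[i])
--         else:
--             end = windows[i][1]
--             if i == len(windows) - 1:
--                 clips.append((start, end))
--     return clips
-- ===== SOURCE B (Python) =====
-- def reduce_cluster_clip_windows(windows):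
--     # Pass 1: table of break indices — clip boundaries, with 0 and len(windows)
--     # as sentinels.
--     breaks = ([0]
--               + [i for i in range(1, len(windows))
--                  if windows[i][0] - windows[i - 1][1] > 30]
--               + [len(windows)])
--     # Pass 2: one clip per pair of consecutive boundaries.
--     return [(windows[lo][0], windows[hi - 1][1])
--             for lo, hi in zip(breaks, breaks[1:])]
-- ===== Notes on version B (the rewrite author's own statement) =====
-- stated objective: alternative
-- what changed: B is two staged index passes over an explicit break-index table: it first collects the boundary indices [0, gaps>30, len] and then zips consecutive boundaries into clips, instead of A's single element scan threading a (start, end) accumulator with last-iteration special cases; Pre_ excludes only the empty list, on which A raises IndexError (and B does too).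
-- intended difference: On inputs whose first window has start - end > 30, A's first loop iteration compares the first window against its own end (leftover initial state) and emits that window as an extra leading clip, so the first window appears in two clips; B emits each window in exactly one clip, which is the intended clustering. — e.g. on reduce_cluster_clip_windows([(100, 0)]): A returns [(100, 0), (100, 0)], B returns [(100, 0)]
import Mathlib
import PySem

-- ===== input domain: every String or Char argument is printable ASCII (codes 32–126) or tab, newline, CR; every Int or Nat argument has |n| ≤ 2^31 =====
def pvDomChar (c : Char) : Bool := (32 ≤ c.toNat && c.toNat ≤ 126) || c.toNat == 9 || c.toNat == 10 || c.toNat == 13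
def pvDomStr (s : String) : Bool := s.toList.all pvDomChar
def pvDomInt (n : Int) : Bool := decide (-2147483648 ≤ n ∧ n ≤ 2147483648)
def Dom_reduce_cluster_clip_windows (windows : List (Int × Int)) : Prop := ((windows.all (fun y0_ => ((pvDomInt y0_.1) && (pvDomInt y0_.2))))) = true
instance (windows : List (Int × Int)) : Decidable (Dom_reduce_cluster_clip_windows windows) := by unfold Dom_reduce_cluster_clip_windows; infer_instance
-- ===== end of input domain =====

-- B rebuilds the clips from an explicit two-pass break-index table (boundary
-- indices first, then one clip per consecutive boundary pair) instead of A's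
-- single scan with an inline (start, end) accumulator; same cost (objective: alternative).

-- ===== PORT A =====
-- A's for-loop over range(len(windows)) as structural recursion on the remaining
-- suffix: `rest = []` after the current element is Python's `i == len(windows)-1`.
def pvLoopA (clips : List (Int × Int)) (start e : Int) :
    List (Int × Int) → List (Int × Int)
  | [] => clips
  | w :: ws =>
    if w.1 - e > 30 then
      let clips := clips ++ [(start, e)]
      let clips := if ws = [] then clips ++ [w] else clips
      pvLoopA clips w.1 w.2 ws
    else
      let clips := if ws = [] then clips ++ [(start, w.2)] else clips
      pvLoopA clips start w.2 ws

def reduce_cluster_clip_windows (windows : List (Int × Int)) : List (Int × Int) :=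
  match windows with
  | [] => []  -- Python raises IndexError on windows[0]; excluded by Pre_
  | w0 :: _ => pvLoopA [] w0.1 w0.2 windows

-- ===== PORT B =====
-- pass 1's comprehension condition: windows[i][0] - windows[i-1][1] > 30
def pvGapAt (windows : List (Int × Int)) (i : Nat) : Bool :=
  decide ((windows.getD i (0, 0)).1 - (windows.getD (i - 1) (0, 0)).2 > 30)

-- Source B pass 1: [0] + [i for i in range(1, len(windows)) if gap at i] + [len(windows)]
def pvBreaks (windows : List (Int × Int)) : List Nat :=
  (0 :: (List.range' 1 (windows.length - 1)).filter (pvGapAt windows))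
    ++ [windows.length]

-- Source B pass 2's comprehension body: (windows[lo][0], windows[hi-1][1])
def pvClipOf (windows : List (Int × Int)) (p : Nat × Nat) : Int × Int :=
  ((windows.getD p.1 (0, 0)).1, (windows.getD (p.2 - 1) (0, 0)).2)

def reduce_cluster_clip_windows_alt (windows : List (Int × Int)) : List (Int × Int) :=
  let bs := pvBreaks windows
  (bs.zip (bs.drop 1)).map (pvClipOf windows)

-- ===== PRECONDITION & SPEC =====
-- Pre_ excludes only the empty list, on which A raises IndexError (windows[0]).
def Pre_reduce_cluster_clip_windows (windows : List (Int × Int)) : Prop := windows ≠ []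
instance (windows : List (Int × Int)) : Decidable (Pre_reduce_cluster_clip_windows windows) := by unfold Pre_reduce_cluster_clip_windows; infer_instance
def pvWitness_reduce_cluster_clip_windows : (List (Int × Int)) := [(0, 10), (20, 30)]

-- On inputs whose FIRST window satisfies start - end > 30, A's very first iteration compares
-- the first window's start against its own end (leftover initial state) and so emits that
-- window in an extra clip before merging it again; B emits each window in exactly one clip,
-- which is the intended clustering.
def D_reduce_cluster_clip_windows (windows : List (Int × Int)) : Prop :=
  (windows.head?.elim false (fun w => decide (30 + w.2 < w.1))) = true
instance (windows : List (Int × Int)) : Decidable (D_reduce_cluster_clip_windows windows) := by unfold D_reduce_cluster_clip_windows; infer_instance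

def Spec_reduce_cluster_clip_windows (windows : List (Int × Int)) (out : List (Int × Int)) : Prop := ¬ D_reduce_cluster_clip_windows windows → out = reduce_cluster_clip_windows_alt windows
instance (windows : List (Int × Int)) (out : List (Int × Int)) : Decidable (Spec_reduce_cluster_clip_windows windows out) := by unfold Spec_reduce_cluster_clip_windows; infer_instance

def pvDiffWitness_reduce_cluster_clip_windows : (List (Int × Int)) := [(100, 0)]
def pvDiffWitnessOut_reduce_cluster_clip_windows : (List (Int × Int)) × (List (Int × Int)) :=
  ([(100, 0), (100, 0)], [(100, 0)])

-- ===== CLAIM (what is proved, stated in full; the proofs are below) =====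
def Claim_unchanged_reduce_cluster_clip_windows : Prop := ∀ (windows : List (Int × Int)), Dom_reduce_cluster_clip_windows windows → Pre_reduce_cluster_clip_windows windows → Spec_reduce_cluster_clip_windows windows (reduce_cluster_clip_windows windows)
def Claim_changed_reduce_cluster_clip_windows : Prop := Dom_reduce_cluster_clip_windows (pvDiffWitness_reduce_cluster_clip_windows) ∧ Pre_reduce_cluster_clip_windows (pvDiffWitness_reduce_cluster_clip_windows) ∧ D_reduce_cluster_clip_windows (pvDiffWitness_reduce_cluster_clip_windows) ∧ reduce_cluster_clip_windows (pvDiffWitness_reduce_cluster_clip_windows) = pvDiffWitnessOut_reduce_cluster_clip_windows.1 ∧ reduce_cluster_clip_windows_alt (pvDiffWitness_reduce_cluster_clip_windows) = pvDiffWitnessOut_reduce_cluster_clip_windows.2 ∧ pvDiffWitnessOut_reduce_cluster_clip_windows.1 ≠ pvDiffWitnessOut_reduce_cluster_clip_windows.2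
def Claim_exact_reduce_cluster_clip_windows : Prop := ∀ (windows : List (Int × Int)), Dom_reduce_cluster_clip_windows windows → Pre_reduce_cluster_clip_windows windows → D_reduce_cluster_clip_windows windows → reduce_cluster_clip_windows windows ≠ reduce_cluster_clip_windows_alt windows

-- ===== LEMMAS AND PROOFS =====

-- the common recursive characterization both ports are proved equal to
def pvClips : (Int × Int) → List (Int × Int) → List (Int × Int)
  | w, [] => [(w.1, w.2)]
  | w, w' :: ws =>
    if w'.1 - w.2 > 30 then (w.1, w.2) :: pvClips w' ws
    else
      match pvClips w' ws with
      | [] => []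
      | c :: cs => (w.1, c.2) :: cs

theorem pvClips_cons (w w' : Int × Int) (ws : List (Int × Int)) :
    pvClips w (w' :: ws) =
      if w'.1 - w.2 > 30 then (w.1, w.2) :: pvClips w' ws
      else
        match pvClips w' ws with
        | [] => []
        | c :: cs => (w.1, c.2) :: cs := by
  rw [pvClips]

-- A-side: the clips A's loop will still emit, given state (start = s, end = e)
def pvG (s e : Int) : List (Int × Int) → List (Int × Int)
  | [] => []
  | w :: ws =>
    if w.1 - e > 30 then
      (if ws = [] then [(s, e), w] else (s, e) :: pvG w.1 w.2 ws)
    else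
      (if ws = [] then [(s, w.2)] else pvG s w.2 ws)

def pvSetStart (s : Int) : List (Int × Int) → List (Int × Int)
  | [] => []
  | c :: cs => (s, c.2) :: cs

theorem pvLoopA_eq_G (rest : List (Int × Int)) : ∀ (clips : List (Int × Int)) (s e : Int),
    pvLoopA clips s e rest = clips ++ pvG s e rest := by
  induction rest with
  | nil => intro clips s e; simp [pvLoopA, pvG]
  | cons w ws ih =>
    intro clips s e
    by_cases hgap : w.1 - e > 30 <;> by_cases hws : ws = [] <;>
      simp [pvLoopA, pvG, hgap, hws, ih]

theorem pvSetStart_clips (w : Int × Int) (ws : List (Int × Int)) :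
    pvSetStart w.1 (pvClips w ws) = pvClips w ws := by
  cases ws with
  | nil => rfl
  | cons w' ws' =>
    unfold pvClips
    by_cases hgap : w'.1 - w.2 > 30
    · simp [hgap, pvSetStart]
    · simp only [hgap, if_false]
      cases pvClips w' ws' with
      | nil => rfl
      | cons c cs => rfl

theorem pvG_eq_setStart (ws : List (Int × Int)) : ∀ (s : Int) (w : Int × Int), ws ≠ [] →
    pvG s w.2 ws = pvSetStart s (pvClips w ws) := by
  induction ws with
  | nil => intro _ _ h; exact absurd rfl h
  | cons w' ws' ih =>
    intro s w _
    cases ws' with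
    | nil =>
      by_cases hgap : w'.1 - w.2 > 30 <;>
        simp [pvG, pvClips, pvSetStart, hgap]
    | cons w'' t =>
      have hne : (w'' :: t) ≠ ([] : List (Int × Int)) := by simp
      unfold pvG pvClips
      by_cases hgap : w'.1 - w.2 > 30
      · simp only [hgap, hne, if_true, if_false]
        rw [ih w'.1 w' hne, pvSetStart_clips]
        rfl
      · simp only [hgap, hne, if_false]
        rw [ih s w' hne]
        cases pvClips w' (w'' :: t) with
        | nil => rfl
        | cons c cs => rfl

-- A equals pvClips whenever the first window is not self-gapped (¬ D_)
theorem pvA_eq_clips (w0 : Int × Int) (rest : List (Int × Int))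
    (h : ¬ (w0.1 - w0.2 > 30)) :
    reduce_cluster_clip_windows (w0 :: rest) = pvClips w0 rest := by
  show pvLoopA [] w0.1 w0.2 (w0 :: rest) = _
  rw [pvLoopA_eq_G, List.nil_append]
  cases rest with
  | nil => simp [pvG, pvClips, h]
  | cons w1 t =>
    have hne : (w1 :: t) ≠ ([] : List (Int × Int)) := by simp
    unfold pvG
    simp only [h, hne, if_false]
    rw [pvG_eq_setStart (w1 :: t) w0.1 w0 hne, pvSetStart_clips]

-- inside D_, A's result is the self-compared first clip prepended to pvClips
theorem pvA_inside (w0 : Int × Int) (rest : List (Int × Int))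
    (h : w0.1 - w0.2 > 30) :
    reduce_cluster_clip_windows (w0 :: rest) = (w0.1, w0.2) :: pvClips w0 rest := by
  show pvLoopA [] w0.1 w0.2 (w0 :: rest) = _
  rw [pvLoopA_eq_G, List.nil_append]
  cases rest with
  | nil => simp [pvG, pvClips, h]
  | cons w1 t =>
    have hne : (w1 :: t) ≠ ([] : List (Int × Int)) := by simp
    unfold pvG
    simp only [h, hne, if_true, reduceIte]
    rw [pvG_eq_setStart (w1 :: t) w0.1 w0 hne, pvSetStart_clips]

-- ===== B-side lemmas =====

def pvPairs (l : List Nat) : List (Nat × Nat) := l.zip (l.drop 1)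

theorem pvAlt_def (windows : List (Int × Int)) :
    reduce_cluster_clip_windows_alt windows =
      (pvPairs (pvBreaks windows)).map (pvClipOf windows) := rfl

theorem pvPairs_cons₂ (a b : Nat) (r : List Nat) :
    pvPairs (a :: b :: r) = (a, b) :: pvPairs (b :: r) := rfl

theorem pvPairs_map_succ (l : List Nat) :
    pvPairs (l.map (· + 1)) = (pvPairs l).map (fun p => (p.1 + 1, p.2 + 1)) := by
  unfold pvPairs
  rw [← List.map_drop, List.zip_map]
  apply List.map_congr_left
  intro p _
  cases p
  rfl

theorem pvPairs_snd_mem (l : List Nat) (p : Nat × Nat) (hp : p ∈ pvPairs l) :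
    p.2 ∈ l.drop 1 := by
  obtain ⟨a, b⟩ := p
  exact (List.of_mem_zip hp).2

theorem pvBreaks_mem_ge_one (tl : List (Int × Int)) (h : tl ≠ [])
    (x : Nat) (hx : x ∈ (pvBreaks tl).drop 1) : 1 ≤ x := by
  unfold pvBreaks at hx
  simp only [List.cons_append, List.drop_succ_cons, List.drop_zero, List.mem_append,
    List.mem_filter, List.mem_singleton] at hx
  rcases hx with ⟨hm, _⟩ | hlen
  · exact (List.mem_range'_1.mp hm).1
  · subst hlen
    cases tl with
    | nil => exact absurd rfl h
    | cons _ _ => simp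

theorem pvClipOf_shift (w0 : Int × Int) (tl : List (Int × Int)) (p : Nat × Nat)
    (h : 1 ≤ p.2) : pvClipOf (w0 :: tl) (p.1 + 1, p.2 + 1) = pvClipOf tl p := by
  obtain ⟨a, b⟩ := p
  obtain ⟨j, rfl⟩ : ∃ j, b = j + 1 := ⟨b - 1, by omega⟩
  rfl

theorem pvBreaks_cons (w0 w1 : Int × Int) (t : List (Int × Int)) :
    pvBreaks (w0 :: w1 :: t) =
      if pvGapAt (w0 :: w1 :: t) 1
      then 0 :: (pvBreaks (w1 :: t)).map (· + 1)
      else 0 :: ((pvBreaks (w1 :: t)).drop 1).map (· + 1) := by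
  have hrange : List.range' 1 (t.length + 1) = 1 :: (List.range' 1 t.length).map (· + 1) := by
    rw [List.range'_succ]
    congr 1
    rw [show ((List.range' 1 t.length).map (· + 1)) = ((List.range' 1 t.length).map (1 + ·)) from
        List.map_congr_left (fun i _ => Nat.add_comm i 1), List.map_add_range']
  have hfilt : ∀ i ∈ List.range' 1 t.length,
      pvGapAt (w0 :: w1 :: t) (i + 1) = pvGapAt (w1 :: t) i := by
    intro i hi
    obtain ⟨j, rfl⟩ : ∃ j, i = j + 1 := ⟨i - 1, by
      have := (List.mem_range'_1.mp hi).1; omega⟩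
    rfl
  unfold pvBreaks
  simp only [List.length_cons, Nat.add_sub_cancel]
  rw [hrange, List.filter_cons, List.filter_map]
  rw [List.filter_congr (fun i hi => by
    simp only [Function.comp_apply]; exact hfilt i hi)]
  by_cases hg : pvGapAt (w0 :: w1 :: t) 1
  · simp [hg, List.cons_append]
  · simp [hg, List.cons_append]

theorem pvAlt_eq_clips (rest : List (Int × Int)) : ∀ (w0 : Int × Int),
    reduce_cluster_clip_windows_alt (w0 :: rest) = pvClips w0 rest := by
  induction rest with
  | nil => intro w0; rfl
  | cons w1 t ih =>
    intro w0
    have hg_iff : pvGapAt (w0 :: w1 :: t) 1 = decide (w1.1 - w0.2 > 30) := rfl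
    have htl_ne : (w1 :: t) ≠ ([] : List (Int × Int)) := by simp
    -- pvBreaks (w1 :: t) = 0 :: L with L ≠ []
    obtain ⟨L, hL⟩ : ∃ L, pvBreaks (w1 :: t) = 0 :: L ∧ L ≠ [] := by
      refine ⟨((List.range' 1 ((w1 :: t).length - 1)).filter (pvGapAt (w1 :: t)))
        ++ [(w1 :: t).length], by simp [pvBreaks], by simp⟩
    obtain ⟨hL, hLne⟩ := hL
    have hmem_shift : ∀ p ∈ pvPairs (pvBreaks (w1 :: t)),
        pvClipOf (w0 :: w1 :: t) (p.1 + 1, p.2 + 1) = pvClipOf (w1 :: t) p := by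
      intro p hp
      exact pvClipOf_shift w0 (w1 :: t) p
        (pvBreaks_mem_ge_one (w1 :: t) htl_ne p.2 (pvPairs_snd_mem _ p hp))
    rw [pvAlt_def, pvBreaks_cons]
    by_cases hg : w1.1 - w0.2 > 30
    · have hgb : pvGapAt (w0 :: w1 :: t) 1 = true := by
        rw [hg_iff]; exact decide_eq_true hg
      rw [if_pos hgb, hL]
      have : ((0 : Nat) :: L).map (· + 1) = 1 :: L.map (· + 1) := by simp
      rw [this]
      rw [show ((0 : Nat) :: 1 :: L.map (· + 1)) = 0 :: ((0 :: L).map (· + 1)) from by simp]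
      rw [show pvPairs (0 :: ((0 :: L).map (· + 1)))
            = (0, 1) :: pvPairs ((0 :: L).map (· + 1)) from by simp [pvPairs_cons₂]]
      rw [List.map_cons, pvPairs_map_succ, List.map_map]
      have hrest : ((pvPairs (0 :: L)).map
          ((pvClipOf (w0 :: w1 :: t)) ∘ fun p => (p.1 + 1, p.2 + 1)))
          = (pvPairs (0 :: L)).map (pvClipOf (w1 :: t)) := by
        apply List.map_congr_left
        intro p hp
        simp only [Function.comp_apply]
        exact hmem_shift p (by rw [hL]; exact hp)
      rw [hrest, ← hL, ← pvAlt_def, ih w1]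
      show (w0.1, w0.2) :: pvClips w1 t = pvClips w0 (w1 :: t)
      rw [pvClips_cons, if_pos hg]
    · have hgb : pvGapAt (w0 :: w1 :: t) 1 = false := by
        rw [hg_iff]; exact decide_eq_false hg
      rw [if_neg (by simp [hgb]), hL]
      simp only [List.drop_succ_cons, List.drop_zero]
      obtain ⟨x, xs, hx⟩ := List.exists_cons_of_ne_nil hLne
      subst hx
      have hx1 : 1 ≤ x :=
        pvBreaks_mem_ge_one (w1 :: t) htl_ne x (by rw [hL]; simp)
      rw [show ((x :: xs).map (· + 1)) = (x + 1) :: xs.map (· + 1) from by simp]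
      rw [show pvPairs ((0 : Nat) :: (x + 1) :: xs.map (· + 1))
            = (0, x + 1) :: pvPairs ((x + 1) :: xs.map (· + 1)) from pvPairs_cons₂ ..]
      rw [show ((x + 1) :: xs.map (· + 1)) = (x :: xs).map (· + 1) from by simp]
      rw [List.map_cons, pvPairs_map_succ, List.map_map]
      have hrest : ((pvPairs (x :: xs)).map
          ((pvClipOf (w0 :: w1 :: t)) ∘ fun p => (p.1 + 1, p.2 + 1)))
          = (pvPairs (x :: xs)).map (pvClipOf (w1 :: t)) := by
        apply List.map_congr_left
        intro p hp
        simp only [Function.comp_apply]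
        apply pvClipOf_shift
        apply pvBreaks_mem_ge_one (w1 :: t) htl_ne
        rw [hL]
        simp only [List.drop_succ_cons, List.drop_zero]
        exact List.mem_cons_of_mem x (pvPairs_snd_mem (x :: xs) p hp)
      rw [hrest]
      -- the tail's clips, via the induction hypothesis
      have hih : pvClips w1 t
          = pvClipOf (w1 :: t) (0, x) :: (pvPairs (x :: xs)).map (pvClipOf (w1 :: t)) := by
        rw [← ih w1, pvAlt_def, hL, pvPairs_cons₂, List.map_cons]
      show pvClipOf (w0 :: w1 :: t) (0, x + 1)
            :: (pvPairs (x :: xs)).map (pvClipOf (w1 :: t)) = pvClips w0 (w1 :: t)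
      rw [pvClips_cons, if_neg hg, hih]
      obtain ⟨j, rfl⟩ : ∃ j, x = j + 1 := ⟨x - 1, by omega⟩
      rfl

-- ===== VERDICT (by name: the statement is the Claim_ definition above) =====
theorem reduce_cluster_clip_windows_spec : Claim_unchanged_reduce_cluster_clip_windows := by
  intro windows _ hpre hnd
  cases windows with
  | nil => exact absurd rfl hpre
  | cons w0 rest =>
    have hle : ¬ (w0.1 - w0.2 > 30) := by
      intro hgt
      apply hnd
      show ((w0 :: rest).head?.elim false (fun w => decide (30 + w.2 < w.1))) = true
      simp
      omega
    rw [pvA_eq_clips w0 rest hle, ← pvAlt_eq_clips rest w0]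

theorem reduce_cluster_clip_windows_changed : Claim_changed_reduce_cluster_clip_windows := by
  unfold Claim_changed_reduce_cluster_clip_windows; decide

theorem reduce_cluster_clip_windows_tight : Claim_exact_reduce_cluster_clip_windows := by
  intro windows _ hpre hd heq
  cases windows with
  | nil => exact absurd rfl hpre
  | cons w0 rest =>
    have hgt : w0.1 - w0.2 > 30 := by
      simp [D_reduce_cluster_clip_windows] at hd
      omega
    have h := pvA_inside w0 rest hgt
    rw [heq, pvAlt_eq_clips rest w0] at h
    have := congrArg List.length h
    simp at this
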